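-- pv_equiv track=rewrite | github.com/RobbiiB/AOC2024 | Day_4.py | get_diags
-- ===== SOURCE A (Python) =====
-- def get_diags(data: list) -> list:
--     left_45: list = []
--     right_45: list = []
--     for i in range(2 * data.__len__()):
--         left_45.append("")
--         right_45.append("")
--         for j in range(i + 1):
--             try:
--                 left_45[i] += data[j][i - j]
--             except:
--                 pass
--             try:
--                 right_45[i] += data[j][::-1][i - j]
--             except:
--                 pass
--     return left_45, right_45
-- ===== SOURCE B (Python) =====
-- def get_diags(data: list) -> list:
--     n = len(data)
--     left = [[] for _ in range(2 * n)]
--     right = [[] for _ in range(2 * n)]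
--     for j, row in enumerate(data):
--         rev = row[::-1]
--         for k, (c, rc) in enumerate(zip(row, rev)):
--             d = j + k
--             if d < 2 * n:
--                 left[d].append(c)
--                 right[d].append(rc)
--     return ["".join(cs) for cs in left], ["".join(cs) for cs in right]
-- ===== Notes on version B (the rewrite author's own statement) =====
-- stated objective: faster
-- what changed: A gathers each of the 2n diagonals by probing every j in range(i+1) with try/except and re-reversing the row on every inner step; B makes one pass over the grid cells, reversing each row once and scattering each character (and its mirrored twin) into the bucket of its diagonal index j+k.
import Mathlib
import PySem

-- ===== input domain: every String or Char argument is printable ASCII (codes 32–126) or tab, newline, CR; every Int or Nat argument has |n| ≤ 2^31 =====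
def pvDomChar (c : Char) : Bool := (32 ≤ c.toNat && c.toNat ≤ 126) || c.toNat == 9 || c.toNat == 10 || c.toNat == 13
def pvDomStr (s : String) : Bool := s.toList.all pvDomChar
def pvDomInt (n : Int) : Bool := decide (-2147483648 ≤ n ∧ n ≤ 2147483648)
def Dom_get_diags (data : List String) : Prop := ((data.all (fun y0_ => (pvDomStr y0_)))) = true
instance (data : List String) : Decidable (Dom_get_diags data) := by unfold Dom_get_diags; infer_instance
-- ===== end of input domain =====

-- B replaces A's try/except gather (which re-reverses each row on every inner step) by a single
-- pass over the grid cells that reverses each row once and scatters chars into per-diagonal buckets.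


-- ===== PORT A =====
-- try: ... data[j][i - j] ... ; except: pass   (None of the chars when either index fails)
def pvChrL (data : List String) (i j : Int) : Option Char :=
  (PySem.List.pyGet? data j).bind fun s => PySem.Str.pyGet? s (i - j)

-- try: ... data[j][::-1][i - j] ... ; except: pass
def pvChrR (data : List String) (i j : Int) : Option Char :=
  (PySem.List.pyGet? data j).bind fun s =>
    (PySem.Str.slice? s none none (-1)).bind fun r => PySem.Str.pyGet? r (i - j)

-- left_45[i] += c  (no-op when the try failed); 0 ≤ i and i is in range whenever A executes this
def pvPush (xs : List String) (i : Int) (c? : Option Char) : List String :=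
  match c? with
  | none => xs
  | some c => xs.set i.toNat (String.ofList ((xs.getD i.toNat "").toList ++ [c]))

def get_diags (data : List String) : List String × List String :=
  (PySem.List.pyRange 0 (2 * (data.length : Int)) 1).foldl
    (fun acc i =>
      (PySem.List.pyRange 0 (i + 1) 1).foldl
        (fun acc2 j => (pvPush acc2.1 i (pvChrL data i j), pvPush acc2.2 i (pvChrR data i j)))
        (acc.1 ++ [""], acc.2 ++ [""]))
    ([], [])

-- ===== PORT B =====
-- left[d].append(c)
def pvBump (bk : List (List Char)) (d : Nat) (c : Char) : List (List Char) :=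
  bk.set d (bk.getD d [] ++ [c])

def get_diags_alt (data : List String) : List String × List String :=
  let n := data.length
  let bks := (PySem.List.enumerate data).foldl
    (fun bk jr =>
      let row := jr.2.toList
      let rev := row.reverse
      (PySem.List.enumerate (row.zip rev)).foldl
        (fun bk2 kcr =>
          let d := jr.1 + kcr.1
          if d < 2 * (n : Int) then
            (pvBump bk2.1 d.toNat kcr.2.1, pvBump bk2.2 d.toNat kcr.2.2)
          else bk2)
        bk)
    (List.replicate (2 * n) [], List.replicate (2 * n) [])
  (bks.1.map String.ofList, bks.2.map String.ofList)

-- ===== PRECONDITION & SPEC =====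
def Spec_get_diags (data : List String) (out : List String × List String) : Prop := out = get_diags_alt data
instance (data : List String) (out : List String × List String) : Decidable (Spec_get_diags data out) := by unfold Spec_get_diags; infer_instance

-- ===== CLAIM (what is proved, stated in full; the proofs are below) =====
def Claim_equal_get_diags : Prop := ∀ (data : List String), Dom_get_diags data → Spec_get_diags data (get_diags data)

-- ===== LEMMAS AND PROOFS =====

-- canonical description of diagonal i (top row first), shared target of both ports
def pvDiagChars : List (List Char) → Int → List Char
  | [], _ => []
  | r :: rs, i => (if 0 ≤ i ∧ i < (r.length : Int) then [r.getD i.toNat default] else []) ++ pvDiagChars rs (i - 1)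

def pvCell (rows : List (List Char)) (i : Int) (j : Nat) : Option Char :=
  rows[j]?.bind fun r => if 0 ≤ i - j ∧ i - j < (r.length : Int) then some (r.getD (i - j).toNat default) else none

theorem pvGather (rows : List (List Char)) (i : Int) :
    (List.range rows.length).filterMap (pvCell rows i) = pvDiagChars rows i := by
  induction rows generalizing i with
  | nil => simp [pvDiagChars]
  | cons r rs ih =>
    rw [List.length_cons, List.range_succ_eq_map, List.filterMap_cons, List.filterMap_map]
    have h2 : (List.filterMap (pvCell (r :: rs) i ∘ (· + 1)) (List.range rs.length))
        = List.filterMap (pvCell rs (i - 1)) (List.range rs.length) := by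
      apply List.filterMap_congr
      intro j _
      have harith : i - ((j : Int) + 1) = (i - 1) - (j : Int) := by ring
      simp only [Function.comp, pvCell, List.getElem?_cons_succ, Nat.cast_add, Nat.cast_one, harith]
    rw [h2, ih]
    have hd : pvDiagChars (r :: rs) i
        = (if 0 ≤ i ∧ i < (r.length : Int) then [r.getD i.toNat default] else []) ++ pvDiagChars rs (i - 1) := rfl
    rw [hd]
    by_cases hcond : 0 ≤ i ∧ i < (r.length : Int)
    · simp only [pvCell, List.getElem?_cons_zero, Option.bind, Nat.cast_zero, Int.sub_zero]
      rw [if_pos hcond, if_pos hcond]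
      simp
    · simp only [pvCell, List.getElem?_cons_zero, Option.bind, Nat.cast_zero, Int.sub_zero]
      rw [if_neg hcond, if_neg hcond]
      simp

theorem pvCell_none_of_len_le (rows : List (List Char)) (i : Int) (j : Nat) (h : rows.length ≤ j) :
    pvCell rows i j = none := by
  simp [pvCell, List.getElem?_eq_none h]

theorem pvCell_none_of_lt (rows : List (List Char)) (i : Int) (j : Nat) (h : i < j) :
    pvCell rows i j = none := by
  unfold pvCell
  cases hg : rows[j]? with
  | none => rfl
  | some r =>
    show (if 0 ≤ i - (j : Int) ∧ i - (j : Int) < (r.length : Int) then some (r.getD (i - (j : Int)).toNat default) else none) = none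
    rw [if_neg]
    omega

theorem pvFilterMap_range_ext {α : Type} (f : Nat → Option α) (m M : Nat) (hmM : m ≤ M)
    (h : ∀ j, m ≤ j → f j = none) :
    (List.range M).filterMap f = (List.range m).filterMap f := by
  induction M with
  | zero => interval_cases m; rfl
  | succ M ih =>
    rcases Nat.eq_or_lt_of_le hmM with rfl | hlt
    · rfl
    · rw [List.range_succ, List.filterMap_append, ih (by omega)]
      simp [h M (by omega)]

-- A side --------------------------------------------------------------------

theorem pvPush_last (Lp : List String) (s : List Char) (c? : Option Char) :
    pvPush (Lp ++ [String.ofList s]) (Lp.length : Int) c?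
      = Lp ++ [String.ofList (s ++ c?.toList)] := by
  cases c? with
  | none => simp [pvPush]
  | some c =>
    simp only [pvPush, Int.toNat_natCast, Option.toList]
    have hg : (Lp ++ [String.ofList s]).getD Lp.length "" = String.ofList s := by
      simp [List.getD]
    have hs : (Lp ++ [String.ofList s]).set Lp.length (String.ofList (s ++ [c]))
        = Lp ++ [String.ofList (s ++ [c])] := by
      rw [List.set_append_right _ _ (le_refl _)]
      simp
    rw [hg]
    simp only [String.toList_ofList]
    rw [hs]

theorem pvInnerA (js : List Int) (f : Int → Option Char) (Lp : List String) (s : List Char) :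
    js.foldl (fun acc j => pvPush acc (Lp.length : Int) (f j)) (Lp ++ [String.ofList s])
      = Lp ++ [String.ofList (s ++ js.filterMap f)] := by
  induction js generalizing s with
  | nil => simp
  | cons j js ih =>
    rw [List.foldl_cons, pvPush_last, ih]
    cases hf : f j <;> simp [hf]

theorem pvOuterA (m : Nat) (f : Int → Int → Option Char) :
    (List.range m).foldl
        (fun L (i : Nat) => (PySem.List.pyRange 0 ((i : Int) + 1) 1).foldl (fun acc j => pvPush acc (i : Int) (f (i : Int) j)) (L ++ [""])) []
      = (List.range m).map (fun (i : Nat) => String.ofList ((PySem.List.pyRange 0 ((i : Int) + 1) 1).filterMap (f (i : Int)))) := by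
  induction m with
  | zero => rfl
  | succ m ih =>
    rw [List.range_succ, List.foldl_append, List.map_append, ih]
    simp only [List.foldl_cons, List.foldl_nil, List.map_cons, List.map_nil]
    have hlen : ((List.range m).map (fun (i : Nat) => String.ofList ((PySem.List.pyRange 0 ((i : Int) + 1) 1).filterMap (f (i : Int))))).length = m := by
      simp
    have hempty : ("" : String) = String.ofList [] := rfl
    rw [hempty]
    have := pvInnerA (PySem.List.pyRange 0 ((m : Int) + 1) 1) (f (m : Int))
      ((List.range m).map (fun (i : Nat) => String.ofList ((PySem.List.pyRange 0 ((i : Int) + 1) 1).filterMap (f (i : Int))))) []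
    rw [hlen] at this
    rw [this]
    simp

theorem pvGetElem?_eq_ite (cs : List Char) (k : Nat) :
    cs[k]? = if 0 ≤ (k : Int) ∧ (k : Int) < (cs.length : Int) then some (cs.getD ((k : Int)).toNat default) else none := by
  by_cases h : k < cs.length
  · rw [if_pos (by constructor <;> omega)]
    simp [List.getElem?_eq_getElem h]
  · rw [if_neg (by omega), List.getElem?_eq_none (by omega)]

theorem pvChrL_eq_cell (data : List String) (i j : Nat) (hj : j ≤ i) :
    pvChrL data (i : Int) (j : Int) = pvCell (data.map String.toList) (i : Int) j := by
  unfold pvChrL pvCell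
  rw [PySem.List.pyGet?_natCast, List.getElem?_map]
  cases hg : data[j]? with
  | none => rfl
  | some s =>
    simp only [Option.map_some, Option.bind_some]
    have hsub : (i : Int) - (j : Int) = ((i - j : Nat) : Int) := by omega
    rw [hsub, PySem.Str.pyGet?_natCast, pvGetElem?_eq_ite]

theorem pvChrR_eq_cell (data : List String) (i j : Nat) (hj : j ≤ i) :
    pvChrR data (i : Int) (j : Int) = pvCell (data.map (fun s => s.toList.reverse)) (i : Int) j := by
  unfold pvChrR pvCell
  rw [PySem.List.pyGet?_natCast, List.getElem?_map]
  cases hg : data[j]? with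
  | none => rfl
  | some s =>
    simp only [Option.map_some, Option.bind_some, PySem.Str.slice?_none_none_neg_one]
    have hsub : (i : Int) - (j : Int) = ((i - j : Nat) : Int) := by omega
    rw [hsub, PySem.Str.pyGet?_natCast, String.toList_ofList, pvGetElem?_eq_ite]

theorem pvCharsGen (data : List String) (i : Nat) (rows : List (List Char))
    (g : Int → Option Char) (hrows : rows.length = data.length)
    (hg : ∀ j : Nat, j ≤ i → g (j : Int) = pvCell rows (i : Int) j) :
    (PySem.List.pyRange 0 ((i : Int) + 1) 1).filterMap g = pvDiagChars rows (i : Int) := by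
  have h1 : PySem.List.pyRange 0 ((i : Int) + 1) 1 = List.map (fun (k : Nat) => (k : Int)) (List.range (i + 1)) := by
    rw [show ((i : Int) + 1) = ((i + 1 : Nat) : Int) by push_cast; ring, PySem.List.pyRange_zero_nat]
  rw [h1, List.filterMap_map]
  have h2 : (List.range (i + 1)).filterMap (g ∘ fun (k : Nat) => (k : Int))
      = (List.range (i + 1)).filterMap (pvCell rows (i : Int)) := by
    apply List.filterMap_congr
    intro j hj
    exact hg j (Nat.lt_succ_iff.mp (List.mem_range.mp hj))
  rw [h2, ← pvGather rows (i : Int), hrows]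
  rcases le_total (i + 1) data.length with h | h
  · exact (pvFilterMap_range_ext _ (i + 1) data.length h
      (fun j hj => pvCell_none_of_lt _ _ _ (by exact_mod_cast Nat.lt_of_succ_le hj))).symm
  · exact pvFilterMap_range_ext _ data.length (i + 1) h
      (fun j hj => pvCell_none_of_len_le _ _ _ (hrows ▸ hj))

theorem pvA_closed (data : List String) :
    get_diags data
      = ((List.range (2 * data.length)).map
            (fun (i : Nat) => String.ofList (pvDiagChars (data.map String.toList) (i : Int))),
         (List.range (2 * data.length)).map
            (fun (i : Nat) => String.ofList (pvDiagChars (data.map (fun s => s.toList.reverse)) (i : Int)))) := by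
  unfold get_diags
  have hstep : (fun (acc : List String × List String) (i : Int) =>
      (PySem.List.pyRange 0 (i + 1) 1).foldl
        (fun acc2 j => (pvPush acc2.1 i (pvChrL data i j), pvPush acc2.2 i (pvChrR data i j)))
        (acc.1 ++ [""], acc.2 ++ [""]))
      = (fun (acc : List String × List String) (i : Int) =>
        ((PySem.List.pyRange 0 (i + 1) 1).foldl (fun L j => pvPush L i (pvChrL data i j)) (acc.1 ++ [""]),
         (PySem.List.pyRange 0 (i + 1) 1).foldl (fun R j => pvPush R i (pvChrR data i j)) (acc.2 ++ [""]))) := by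
    funext acc i
    exact PySem.List.foldl_prod_mk (fun L j => pvPush L i (pvChrL data i j))
      (fun R j => pvPush R i (pvChrR data i j)) (PySem.List.pyRange 0 (i + 1) 1)
      (acc.1 ++ [""]) (acc.2 ++ [""])
  rw [hstep]
  rw [PySem.List.foldl_prod_mk
    (fun L i => (PySem.List.pyRange 0 (i + 1) 1).foldl (fun L j => pvPush L i (pvChrL data i j)) (L ++ [""]))
    (fun R i => (PySem.List.pyRange 0 (i + 1) 1).foldl (fun R j => pvPush R i (pvChrR data i j)) (R ++ [""]))]
  have hrange : PySem.List.pyRange 0 (2 * (data.length : Int)) 1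
      = List.map (fun (k : Nat) => (k : Int)) (List.range (2 * data.length)) := by
    rw [show (2 * (data.length : Int)) = ((2 * data.length : Nat) : Int) by push_cast; ring,
      PySem.List.pyRange_zero_nat]
  rw [hrange, List.foldl_map, List.foldl_map, pvOuterA _ (pvChrL data), pvOuterA _ (pvChrR data)]
  refine congrArg₂ Prod.mk ?_ ?_
  · apply List.map_congr_left
    intro i _
    exact congrArg String.ofList
      (pvCharsGen data i _ (pvChrL data (i : Int)) (by simp) (fun j hj => pvChrL_eq_cell data i j hj))
  · apply List.map_congr_left
    intro i _
    exact congrArg String.ofList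
      (pvCharsGen data i _ (pvChrR data (i : Int)) (by simp) (fun j hj => pvChrR_eq_cell data i j hj))

-- B side --------------------------------------------------------------------

def pvStepB (n2 : Int) (sel : Char × Char → Char) (bk : List (List Char)) (e : Int × (Char × Char)) : List (List Char) :=
  if e.1 < n2 then pvBump bk e.1.toNat (sel e.2) else bk

theorem pvEnum_fst_nonneg {α : Type} (ps : List α) (s : Int) (e : Int × α) (he : e ∈ PySem.List.enumerate ps s) :
    s ≤ e.1 := by
  induction ps generalizing s with
  | nil => simp [PySem.List.enumerate] at he
  | cons p ps ih =>
    rw [PySem.List.enumerate_cons] at he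
    rcases List.mem_cons.mp he with rfl | h
    · rfl
    · exact le_trans (by omega) (ih (s + 1) h)

theorem pvScatter (n2 : Int) (sel : Char × Char → Char) (evs : List (Int × (Char × Char)))
    (bk : List (List Char)) (hpos : ∀ e ∈ evs, 0 ≤ e.1) (hbk : (bk.length : Int) = n2) :
    (evs.foldl (pvStepB n2 sel) bk).length = bk.length ∧
    ∀ d : Nat, d < bk.length →
      (evs.foldl (pvStepB n2 sel) bk).getD d []
        = bk.getD d [] ++ evs.filterMap (fun e => if e.1 = (d : Int) then some (sel e.2) else none) := by
  induction evs generalizing bk with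
  | nil => simp
  | cons e evs ih =>
    have hpos' : ∀ e' ∈ evs, 0 ≤ e'.1 := fun e' h => hpos e' (List.mem_cons_of_mem _ h)
    have he0 : 0 ≤ e.1 := hpos e (by simp)
    rw [List.foldl_cons]
    by_cases hlt : e.1 < n2
    · have hstep : pvStepB n2 sel bk e = pvBump bk e.1.toNat (sel e.2) := by
        simp [pvStepB, hlt]
      have hlen : (pvBump bk e.1.toNat (sel e.2)).length = bk.length := by simp [pvBump]
      obtain ⟨ihl, ihd⟩ := ih (pvBump bk e.1.toNat (sel e.2)) hpos' (by rw [hlen]; exact hbk)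
      refine ⟨by rw [hstep, ihl, hlen], ?_⟩
      intro d hd
      rw [hstep, ihd d (by omega), List.filterMap_cons]
      by_cases heq : e.1 = (d : Int)
      · rw [if_pos heq]
        have : e.1.toNat = d := by omega
        rw [this]
        have hdl : d < bk.length := hd
        simp [pvBump, List.getD, hdl, List.append_assoc]
      · rw [if_neg heq]
        have hne : e.1.toNat ≠ d := by omega
        simp [pvBump, List.getD, List.getElem?_set_ne hne]
    · have hstep : pvStepB n2 sel bk e = bk := by simp [pvStepB, hlt]
      obtain ⟨ihl, ihd⟩ := ih bk hpos' hbk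
      refine ⟨by rw [hstep, ihl], ?_⟩
      intro d hd
      rw [hstep, ihd d hd, List.filterMap_cons]
      have heq : ¬ (e.1 = (d : Int)) := by omega
      rw [if_neg heq]

theorem pvEnumPick {α : Type} [Inhabited α] (h : α → Char) (ps : List α) (s t : Int) :
    (PySem.List.enumerate ps s).filterMap (fun kc => if kc.1 = t then some (h kc.2) else none)
      = if s ≤ t ∧ t < s + ps.length then [h (ps.getD (t - s).toNat default)] else [] := by
  induction ps generalizing s with
  | nil => simp [PySem.List.enumerate]
  | cons p ps ih =>
    rw [PySem.List.enumerate_cons, List.filterMap_cons]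
    by_cases hst : s = t
    · simp only [if_pos hst]
      rw [ih (s + 1)]
      rw [if_neg (by omega)]
      rw [if_pos (by simp; omega)]
      subst hst
      simp
    · simp only [if_neg hst]
      rw [ih (s + 1)]
      by_cases hin : s + 1 ≤ t ∧ t < s + 1 + ps.length
      · rw [if_pos hin, if_pos (by constructor <;> [omega; (simp; omega)])]
        have hidx : (t - s).toNat = (t - (s + 1)).toNat + 1 := by omega
        rw [hidx, List.getD_cons_succ]
      · rw [if_neg hin, if_neg (by simp only [List.length_cons]; push_cast at hin ⊢; omega)]

theorem pvRowContrib (sel : Char × Char → Char) (row : List Char) (j d : Int) :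
    ((PySem.List.enumerate (row.zip row.reverse)).map (fun kcr => ((j + kcr.1 : Int), kcr.2))).filterMap
        (fun e => if e.1 = d then some (sel e.2) else none)
      = if 0 ≤ d - j ∧ d - j < (row.length : Int)
          then [sel ((row.zip row.reverse).getD (d - j).toNat default)] else [] := by
  rw [List.filterMap_map]
  have hcong : ∀ kc ∈ PySem.List.enumerate (row.zip row.reverse),
      ((fun e => if e.1 = d then some (sel e.2) else none) ∘ fun kcr => ((j + kcr.1 : Int), kcr.2)) kc
        = (fun kc : Int × (Char × Char) => if kc.1 = d - j then some (sel kc.2) else none) kc := by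
    intro kc _
    by_cases hc : kc.1 = d - j
    · simp only [Function.comp]; rw [if_pos (by omega), if_pos hc]
    · simp only [Function.comp]; rw [if_neg (by omega), if_neg hc]
  rw [List.filterMap_congr hcong, pvEnumPick]
  have hzl : ((row.zip row.reverse).length : Int) = (row.length : Int) := by
    simp
  rw [show (0 : Int) + ((row.zip row.reverse).length : Int) = (row.length : Int) by omega]
  rw [show d - j - 0 = d - j by ring]

theorem pvAssemble (conv : String → List Char) (contrib : String → Int → List Char)
    (hcontrib : ∀ (r : String) (t : Int),
      contrib r t = if 0 ≤ t ∧ t < (r.toList.length : Int) then [(conv r).getD t.toNat default] else [])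
    (hlen : ∀ r : String, (conv r).length = r.toList.length) :
    ∀ (rows : List String) (s d : Int),
      (PySem.List.enumerate rows s).flatMap (fun jr => contrib jr.2 (d - jr.1))
        = pvDiagChars (rows.map conv) (d - s) := by
  intro rows
  induction rows with
  | nil => intro s d; simp [PySem.List.enumerate, pvDiagChars]
  | cons r rs ih =>
    intro s d
    rw [PySem.List.enumerate_cons, List.flatMap_cons, hcontrib]
    have hd : pvDiagChars ((r :: rs).map conv) (d - s)
        = (if 0 ≤ d - s ∧ d - s < ((conv r).length : Int) then [(conv r).getD (d - s).toNat default] else [])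
            ++ pvDiagChars (rs.map conv) (d - s - 1) := rfl
    rw [hd, hlen r]
    have ht : (PySem.List.enumerate rs (s + 1)).flatMap (fun jr => contrib jr.2 (d - jr.1))
        = pvDiagChars (rs.map conv) (d - s - 1) := by
      rw [ih (s + 1) d]
      congr 1
      ring
    rw [ht]

theorem pvZipGetD (row : List Char) (m : Nat) (hm : m < row.length) :
    (row.zip row.reverse).getD m default = (row.getD m default, row.reverse.getD m default) := by
  have hz : m < (row.zip row.reverse).length := by simp; omega
  rw [List.getD_eq_getElem _ _ hz, List.getElem_zip,
    List.getD_eq_getElem _ _ hm, List.getD_eq_getElem _ _ (by simp; omega)]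

theorem pvCompB (data : List String) (sel : Char × Char → Char) (conv : String → List Char)
    (hlen : ∀ r : String, (conv r).length = r.toList.length)
    (hsel : ∀ (r : String) (m : Nat), m < r.toList.length →
      sel ((r.toList.zip r.toList.reverse).getD m default) = (conv r).getD m default) :
    ((PySem.List.enumerate data).flatMap
        (fun jr => (PySem.List.enumerate ((jr.2.toList).zip (jr.2.toList.reverse))).map
          (fun kcr => ((jr.1 + kcr.1 : Int), kcr.2)))).foldl
        (pvStepB (2 * (data.length : Int)) sel) (List.replicate (2 * data.length) [])
      = (List.range (2 * data.length)).map (fun (d : Nat) => pvDiagChars (data.map conv) (d : Int)) := by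
  set EVS := (PySem.List.enumerate data).flatMap
      (fun jr => (PySem.List.enumerate ((jr.2.toList).zip (jr.2.toList.reverse))).map
        (fun kcr => ((jr.1 + kcr.1 : Int), kcr.2))) with hEVS
  have hpos : ∀ e ∈ EVS, 0 ≤ e.1 := by
    intro e he
    rw [hEVS] at he
    obtain ⟨jr, hjr, he2⟩ := List.mem_flatMap.mp he
    obtain ⟨kcr, hkcr, rfl⟩ := List.mem_map.mp he2
    have h1 : (0 : Int) ≤ jr.1 := pvEnum_fst_nonneg _ _ _ hjr
    have h2 : (0 : Int) ≤ kcr.1 := pvEnum_fst_nonneg _ _ _ hkcr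
    simpa using add_nonneg h1 h2
  have hbk : ((List.replicate (2 * data.length) ([] : List Char)).length : Int) = 2 * (data.length : Int) := by
    simp
  obtain ⟨hL, hD⟩ := pvScatter (2 * (data.length : Int)) sel EVS _ hpos hbk
  apply List.ext_getElem
  · rw [hL]; simp
  · intro d hd1 hd2
    have hdlen : d < (List.replicate (2 * data.length) ([] : List Char)).length := by
      simp only [List.length_replicate]
      rw [hL] at hd1
      simpa using hd1
    rw [← List.getD_eq_getElem _ [] hd1, hD d hdlen]
    have hrep : (List.replicate (2 * data.length) ([] : List Char)).getD d [] = [] := by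
      simp [List.getD]
    rw [hrep, List.nil_append, hEVS, List.filterMap_flatMap]
    have hrow : (fun jr : Int × String =>
        ((PySem.List.enumerate ((jr.2.toList).zip (jr.2.toList.reverse))).map
            (fun kcr => ((jr.1 + kcr.1 : Int), kcr.2))).filterMap
          (fun e => if e.1 = (d : Int) then some (sel e.2) else none))
        = (fun jr : Int × String => (fun (r : String) (t : Int) => if 0 ≤ t ∧ t < (r.toList.length : Int)
            then [sel ((r.toList.zip r.toList.reverse).getD t.toNat default)] else []) jr.2 ((d : Int) - jr.1)) := by
      funext jr
      exact pvRowContrib sel jr.2.toList jr.1 (d : Int)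
    rw [hrow]
    have hcontrib : ∀ (r : String) (t : Int),
        (fun (r : String) (t : Int) => if 0 ≤ t ∧ t < (r.toList.length : Int)
            then [sel ((r.toList.zip r.toList.reverse).getD t.toNat default)] else []) r t
          = if 0 ≤ t ∧ t < (r.toList.length : Int) then [(conv r).getD t.toNat default] else [] := by
      intro r t
      by_cases hc : 0 ≤ t ∧ t < (r.toList.length : Int)
      · simp only [if_pos hc]
        rw [hsel r t.toNat (by omega)]
      · simp only [if_neg hc]
    rw [pvAssemble conv _ hcontrib hlen data 0 (d : Int)]
    rw [show (d : Int) - 0 = (d : Int) by ring]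
    rw [List.getElem_map, List.getElem_range]

theorem pvB_closed (data : List String) :
    get_diags_alt data
      = ((List.range (2 * data.length)).map
            (fun (i : Nat) => String.ofList (pvDiagChars (data.map String.toList) (i : Int))),
         (List.range (2 * data.length)).map
            (fun (i : Nat) => String.ofList (pvDiagChars (data.map (fun s => s.toList.reverse)) (i : Int)))) := by
  unfold get_diags_alt
  simp only []
  have hfun : (fun (bk : List (List Char) × List (List Char)) (jr : Int × String) =>
      (PySem.List.enumerate ((jr.2.toList).zip (jr.2.toList.reverse))).foldl
        (fun bk2 kcr =>
          if jr.1 + kcr.1 < 2 * (data.length : Int) then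
            (pvBump bk2.1 (jr.1 + kcr.1).toNat kcr.2.1, pvBump bk2.2 (jr.1 + kcr.1).toNat kcr.2.2)
          else bk2)
        bk)
      = fun bk jr =>
        (((PySem.List.enumerate ((jr.2.toList).zip (jr.2.toList.reverse))).map
            (fun kcr => ((jr.1 + kcr.1 : Int), kcr.2))).foldl (pvStepB (2 * (data.length : Int)) Prod.fst) bk.1,
         ((PySem.List.enumerate ((jr.2.toList).zip (jr.2.toList.reverse))).map
            (fun kcr => ((jr.1 + kcr.1 : Int), kcr.2))).foldl (pvStepB (2 * (data.length : Int)) Prod.snd) bk.2) := by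
    funext bk jr
    have hsplit : (fun (bk2 : List (List Char) × List (List Char)) (kcr : Int × (Char × Char)) =>
        if jr.1 + kcr.1 < 2 * (data.length : Int) then
          (pvBump bk2.1 (jr.1 + kcr.1).toNat kcr.2.1, pvBump bk2.2 (jr.1 + kcr.1).toNat kcr.2.2)
        else bk2)
        = fun bk2 kcr =>
          (pvStepB (2 * (data.length : Int)) Prod.fst bk2.1 ((jr.1 + kcr.1 : Int), kcr.2),
           pvStepB (2 * (data.length : Int)) Prod.snd bk2.2 ((jr.1 + kcr.1 : Int), kcr.2)) := by
      funext bk2 kcr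
      simp only [pvStepB]
      split <;> rfl
    rw [hsplit]
    exact (PySem.List.foldl_prod_mk
        (fun b kcr => pvStepB (2 * (data.length : Int)) Prod.fst b ((jr.1 + kcr.1 : Int), kcr.2))
        (fun b kcr => pvStepB (2 * (data.length : Int)) Prod.snd b ((jr.1 + kcr.1 : Int), kcr.2))
        (PySem.List.enumerate ((jr.2.toList).zip (jr.2.toList.reverse))) bk.1 bk.2).trans
      (congrArg₂ Prod.mk List.foldl_map.symm List.foldl_map.symm)
  rw [hfun]
  have houter : (PySem.List.enumerate data).foldl
      (fun (bk : List (List Char) × List (List Char)) (jr : Int × String) =>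
        (((PySem.List.enumerate ((jr.2.toList).zip (jr.2.toList.reverse))).map
            (fun kcr => ((jr.1 + kcr.1 : Int), kcr.2))).foldl (pvStepB (2 * (data.length : Int)) Prod.fst) bk.1,
         ((PySem.List.enumerate ((jr.2.toList).zip (jr.2.toList.reverse))).map
            (fun kcr => ((jr.1 + kcr.1 : Int), kcr.2))).foldl (pvStepB (2 * (data.length : Int)) Prod.snd) bk.2))
      (List.replicate (2 * data.length) [], List.replicate (2 * data.length) [])
      = ((PySem.List.enumerate data).foldl
          (fun b jr => ((PySem.List.enumerate ((jr.2.toList).zip (jr.2.toList.reverse))).map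
            (fun kcr => ((jr.1 + kcr.1 : Int), kcr.2))).foldl (pvStepB (2 * (data.length : Int)) Prod.fst) b)
          (List.replicate (2 * data.length) []),
         (PySem.List.enumerate data).foldl
          (fun b jr => ((PySem.List.enumerate ((jr.2.toList).zip (jr.2.toList.reverse))).map
            (fun kcr => ((jr.1 + kcr.1 : Int), kcr.2))).foldl (pvStepB (2 * (data.length : Int)) Prod.snd) b)
          (List.replicate (2 * data.length) [])) :=
    PySem.List.foldl_prod_mk
      (fun b (jr : Int × String) => ((PySem.List.enumerate ((jr.2.toList).zip (jr.2.toList.reverse))).map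
        (fun kcr => ((jr.1 + kcr.1 : Int), kcr.2))).foldl (pvStepB (2 * (data.length : Int)) Prod.fst) b)
      (fun b (jr : Int × String) => ((PySem.List.enumerate ((jr.2.toList).zip (jr.2.toList.reverse))).map
        (fun kcr => ((jr.1 + kcr.1 : Int), kcr.2))).foldl (pvStepB (2 * (data.length : Int)) Prod.snd) b)
      (PySem.List.enumerate data) (List.replicate (2 * data.length) []) (List.replicate (2 * data.length) [])
  rw [houter]
  have hflat1 : (PySem.List.enumerate data).foldl
      (fun b jr => ((PySem.List.enumerate ((jr.2.toList).zip (jr.2.toList.reverse))).map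
        (fun kcr => ((jr.1 + kcr.1 : Int), kcr.2))).foldl (pvStepB (2 * (data.length : Int)) Prod.fst) b)
      (List.replicate (2 * data.length) [])
      = ((PySem.List.enumerate data).flatMap
          (fun jr => (PySem.List.enumerate ((jr.2.toList).zip (jr.2.toList.reverse))).map
            (fun kcr => ((jr.1 + kcr.1 : Int), kcr.2)))).foldl
          (pvStepB (2 * (data.length : Int)) Prod.fst) (List.replicate (2 * data.length) []) :=
    List.foldl_flatMap.symm
  have hflat2 : (PySem.List.enumerate data).foldl
      (fun b jr => ((PySem.List.enumerate ((jr.2.toList).zip (jr.2.toList.reverse))).map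
        (fun kcr => ((jr.1 + kcr.1 : Int), kcr.2))).foldl (pvStepB (2 * (data.length : Int)) Prod.snd) b)
      (List.replicate (2 * data.length) [])
      = ((PySem.List.enumerate data).flatMap
          (fun jr => (PySem.List.enumerate ((jr.2.toList).zip (jr.2.toList.reverse))).map
            (fun kcr => ((jr.1 + kcr.1 : Int), kcr.2)))).foldl
          (pvStepB (2 * (data.length : Int)) Prod.snd) (List.replicate (2 * data.length) []) :=
    List.foldl_flatMap.symm
  rw [hflat1, hflat2]
  rw [pvCompB data Prod.fst String.toList (fun r => rfl)
      (fun r m hm => by rw [pvZipGetD _ _ hm]),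
    pvCompB data Prod.snd (fun s => s.toList.reverse) (fun r => by simp)
      (fun r m hm => by rw [pvZipGetD _ _ hm])]
  simp [List.map_map, Function.comp]


-- ===== VERDICT (by name: the statement is the Claim_ definition above) =====
theorem get_diags_spec : Claim_equal_get_diags := by
  intro data _
  unfold Spec_get_diags
  rw [pvA_closed, pvB_closed]
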